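-- pv_equiv track=rewrite | github.com/HassanMehmood413/UC_Berkeley_Coding_Competition_2024 | OREREREREOOOOOOOOO (Problem 01)/uc3.py | draw_cookies
-- ===== SOURCE A (Python) =====
-- def draw_cookies(test_cases):
--     results = []  # List to store results for all test cases
--
--     for test in test_cases:
--         arr = []  # List to store lines for the current test case
--         token = ""  # Accumulate characters to form tokens
--
--         for char in test:
--             token += char  # Append current character to the token
--
--             if token == 'O':
--                 arr.append("[###OREO###]")  # Add line for 'O'
--                 token = ""  # Reset token
--             elif token == 'RE':
--                 arr.append("[--------]")  # Add line for 'RE'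
--                 token = ""  # Reset token
--             elif token == '&':
--                 arr.append("")  # Add an empty line for '&'
--                 token = ""  # Reset token
--
--         results.append("\n".join(arr))  # Combine all lines for this test case
--
--     return results
-- ===== SOURCE B (Python) =====
-- def draw_cookies(test_cases):
--     results = []
--     for test in test_cases:
--         lines = []
--         i = 0
--         n = len(test)
--         while i < n:
--             c = test[i]
--             if c == 'O':
--                 lines.append("[###OREO###]")
--                 i += 1
--             elif c == '&':
--                 lines.append("")
--                 i += 1
--             elif test[i:i + 2] == 'RE':
--                 lines.append("[--------]")
--                 i += 2
--             else:
--                 # any unmatched character permanently stops output for this test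
--                 break
--         results.append("\n".join(lines))
--     return results
-- ===== Notes on version B (the rewrite author's own statement) =====
-- stated objective: alternative
-- what changed: Replaced A's growing token-accumulator state machine with an index scan over each test string using 2-character lookahead for 'RE' and an explicit break on the first unmatched character (which in A permanently poisons the token so nothing more is emitted).
import Mathlib
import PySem

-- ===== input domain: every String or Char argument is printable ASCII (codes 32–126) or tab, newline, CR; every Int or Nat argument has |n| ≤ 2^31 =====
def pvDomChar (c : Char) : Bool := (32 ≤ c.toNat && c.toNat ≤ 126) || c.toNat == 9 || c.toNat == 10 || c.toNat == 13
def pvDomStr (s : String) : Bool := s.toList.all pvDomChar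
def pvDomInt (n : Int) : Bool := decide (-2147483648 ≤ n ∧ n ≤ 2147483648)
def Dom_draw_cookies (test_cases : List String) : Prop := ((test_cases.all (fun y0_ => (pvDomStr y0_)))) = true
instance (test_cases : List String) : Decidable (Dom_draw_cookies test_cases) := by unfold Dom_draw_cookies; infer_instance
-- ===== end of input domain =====

-- B replaces A's growing token accumulator with an index scan using 2-char lookahead that
-- stops at the first unmatched character (objective: alternative decomposition, same cost).

-- ===== PORT A =====
-- A's inner loop: state is (arr, token); the Python str token is carried as its List Char.
def pvStepA (st : List String × List Char) (c : Char) : List String × List Char :=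
  let token := st.2 ++ [c]
  if token = ['O'] then (st.1 ++ ["[###OREO###]"], [])
  else if token = ['R', 'E'] then (st.1 ++ ["[--------]"], [])
  else if token = ['&'] then (st.1 ++ [""], [])
  else (st.1, token)

def draw_cookies (test_cases : List String) : List String :=
  test_cases.map (fun test =>
    PySem.Str.join "\n" (test.toList.foldl pvStepA ([], [])).1)

-- ===== PORT B =====
-- Source B's while-i scan over test: consuming the front of the char list = advancing i;
-- the slice test[i:i+2] == 'RE' is the match on the first two remaining chars.
def pvScanB : List Char → List String
  | [] => []
  | c :: rest =>
    if c = 'O' then "[###OREO###]" :: pvScanB rest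
    else if c = '&' then "" :: pvScanB rest
    else if c = 'R' then
      -- test[i:i+2] == 'RE': the next remaining char must be 'E'; consume both
      if rest.head? = some 'E' then "[--------]" :: pvScanB rest.tail
      else []
    else []
termination_by cs => cs.length
decreasing_by all_goals (simp only [List.length_cons, List.length_tail]; omega)

def draw_cookies_alt (test_cases : List String) : List String :=
  test_cases.map (fun test => PySem.Str.join "\n" (pvScanB test.toList))

-- ===== PRECONDITION & SPEC =====
def Spec_draw_cookies (test_cases : List String) (out : List String) : Prop := out = draw_cookies_alt test_cases
instance (test_cases : List String) (out : List String) : Decidable (Spec_draw_cookies test_cases out) := by unfold Spec_draw_cookies; infer_instance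

-- ===== CLAIM (what is proved, stated in full; the proofs are below) =====
def Claim_equal_draw_cookies : Prop := ∀ (test_cases : List String), Dom_draw_cookies test_cases → Spec_draw_cookies test_cases (draw_cookies test_cases)

-- ===== LEMMAS AND PROOFS =====

theorem pvLenNe {t : List Char} {c : Char} {l : List Char} (h : t.length + 1 ≠ l.length) :
    t ++ [c] ≠ l := by
  intro he; apply h; simpa using congrArg List.length he

-- Once A's token is nonempty and not "R", it can never match a pattern again: arr is frozen.
theorem pvStuckA (cs : List Char) : ∀ (arr : List String) (t : List Char),
    1 ≤ t.length → t ≠ ['R'] → (cs.foldl pvStepA (arr, t)).1 = arr := by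
  induction cs with
  | nil => intro arr t _ _; simp
  | cons c cs ih =>
    intro arr t hlen hR
    have h1 : t ++ [c] ≠ ['O'] := pvLenNe (by simp only [List.length_cons, List.length_nil]; omega)
    have h3 : t ++ [c] ≠ ['&'] := pvLenNe (by simp only [List.length_cons, List.length_nil]; omega)
    have hR' : t ++ [c] ≠ ['R'] := pvLenNe (by simp only [List.length_cons, List.length_nil]; omega)
    have h2 : t ++ [c] ≠ ['R', 'E'] := by
      intro he
      rcases t with _ | ⟨a, t2⟩
      · simp at hlen
      · rcases t2 with _ | ⟨b, t3⟩
        · simp_all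
        · exact pvLenNe (by simp only [List.length_cons, List.length_nil]; omega) he
    rw [List.foldl_cons]
    have hs : pvStepA (arr, t) c = (arr, t ++ [c]) := by
      simp [pvStepA, h1, h2, h3]
    rw [hs]
    exact ih arr (t ++ [c]) (by simp) hR'

-- Main invariant: from an empty token, A's inner loop appends exactly B's scan.
theorem pvMainA : ∀ (n : ℕ) (cs : List Char), cs.length ≤ n → ∀ (arr : List String),
    (cs.foldl pvStepA (arr, [])).1 = arr ++ pvScanB cs := by
  intro n
  induction n with
  | zero =>
    intro cs h arr
    rcases cs with _ | _
    · simp [pvScanB]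
    · simp at h
  | succ n ih =>
    intro cs h arr
    rcases cs with _ | ⟨c, cs'⟩
    · simp [pvScanB]
    · by_cases hO : c = 'O'
      · subst hO
        rw [List.foldl_cons, show pvStepA (arr, []) 'O' = (arr ++ ["[###OREO###]"], []) from by
          simp [pvStepA]]
        rw [ih cs' (by simpa using h) (arr ++ ["[###OREO###]"])]
        simp [pvScanB]
      · by_cases hA : c = '&'
        · subst hA
          rw [List.foldl_cons, show pvStepA (arr, []) '&' = (arr ++ [""], []) from by
            simp [pvStepA]]
          rw [ih cs' (by simpa using h) (arr ++ [""])]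
          simp [pvScanB]
        · by_cases hRc : c = 'R'
          · subst hRc
            rw [List.foldl_cons, show pvStepA (arr, []) 'R' = (arr, ['R']) from by
              simp [pvStepA]]
            rcases cs' with _ | ⟨c2, cs''⟩
            · simp [pvScanB]
            · by_cases hE : c2 = 'E'
              · subst hE
                rw [List.foldl_cons, show pvStepA (arr, ['R']) 'E' = (arr ++ ["[--------]"], []) from by
                  simp [pvStepA]]
                rw [ih cs'' (by simp at h ⊢; omega) (arr ++ ["[--------]"])]
                simp [pvScanB]
              · rw [List.foldl_cons, show pvStepA (arr, ['R']) c2 = (arr, ['R', c2]) from by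
                  simp [pvStepA, hE]]
                rw [pvStuckA cs'' arr ['R', c2] (by simp) (by simp)]
                simp [pvScanB, hE]
          · rw [List.foldl_cons, show pvStepA (arr, []) c = (arr, [c]) from by
              simp [pvStepA, hO, hA, hRc]]
            rw [pvStuckA cs' arr [c] (by simp) (by simp [hRc])]
            simp [pvScanB, hO, hA, hRc]

-- ===== VERDICT (by name: the statement is the Claim_ definition above) =====
theorem draw_cookies_spec : Claim_equal_draw_cookies := by
  intro test_cases _
  unfold Spec_draw_cookies draw_cookies draw_cookies_alt
  apply List.map_congr_left
  intro test _
  rw [pvMainA test.toList.length test.toList le_rfl []]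
  simp
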